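-- pv_equiv track=rewrite | github.com/sohom070994/2023.0039 | scripts/MCS_PSA.py | getRejections
-- ===== SOURCE A (Python) =====
-- def getRejections(a,x):
--     """Takes an arrival vector and the schedule and returns the number of rejections.
--
--     Args:
--         a (list): list of number of arrivals at the beginning of each time slot
--         x (list): schedule, i.e., binary array of time slots with 1s in available slots
--
--     Returns:
--         int: number of rejections.
--     """
--     pending_vec = [None]*len(a)
--     for i in range(len(a)):
--         if i==0:
--             pending_vec[i]= max(a[i]-x[i],0)
--         else:
--             pending_vec[i]= max( pending_vec[i-1]+ a[i]-x[i],0)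
--     return pending_vec[-1]
-- ===== SOURCE B (Python) =====
-- def getRejections(a, x):
--     """Final backlog (rejections) via the Lindley identity:
--     the clamped forward accumulation's final value equals
--     max(0, max over suffixes of sum(a[i]-x[i]))."""
--     best = 0
--     s = 0
--     for i in range(len(a) - 1, -1, -1):
--         s += a[i] - x[i]
--         if s > best:
--             best = s
--     return best
-- ===== Notes on version B (the rewrite author's own statement) =====
-- stated objective: faster
-- what changed: Replaces the forward clamp-at-zero recursion over an allocated pending_vec list with a single backward scan maintaining a running suffix sum and its maximum (Lindley identity: final backlog = max(0, max suffix sum of a[i]-x[i])), with no intermediate list.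
import Mathlib
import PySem

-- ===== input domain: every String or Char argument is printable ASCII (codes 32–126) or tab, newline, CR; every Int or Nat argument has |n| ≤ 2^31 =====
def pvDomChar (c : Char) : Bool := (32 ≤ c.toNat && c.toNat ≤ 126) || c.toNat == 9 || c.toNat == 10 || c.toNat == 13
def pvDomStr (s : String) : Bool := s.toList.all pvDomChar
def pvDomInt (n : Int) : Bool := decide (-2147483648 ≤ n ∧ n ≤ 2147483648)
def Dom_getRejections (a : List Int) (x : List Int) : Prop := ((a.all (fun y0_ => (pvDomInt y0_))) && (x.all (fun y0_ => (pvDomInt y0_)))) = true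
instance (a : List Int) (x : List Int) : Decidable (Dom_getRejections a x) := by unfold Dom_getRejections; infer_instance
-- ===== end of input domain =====

-- B replaces A's forward clamp-at-zero recursion (stored in a pending_vec list) by a single
-- backward scan of a running suffix sum and its maximum (Lindley identity); return value only.

-- ===== PORT A =====
-- Python builds pending_vec index by index; identical here: the loop over i becomes a
-- recursion over the (a[i],x[i]) pairs carrying the pending_vec built so far, with the
-- i==0 / i>0 branch kept (pending_vec[i-1] is the last element built). Indices are valid
-- on Pre_, so list access is by the pair structure itself.
def getRejectionsGo (l : List (Int × Int)) (pv : List Int) : List Int :=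
  match l with
  | [] => pv
  | q :: t =>
      if pv.isEmpty then
        getRejectionsGo t (pv ++ [max (q.1 - q.2) 0])
      else
        getRejectionsGo t (pv ++ [max (pv.getLastD 0 + q.1 - q.2) 0])

def getRejections (a : List Int) (x : List Int) : Int :=
  (getRejectionsGo (a.zip x) []).getLastD 0   -- pending_vec[-1]; Pre_ makes it nonempty

-- ===== PORT B =====
-- Source B walks i from len(a)-1 down to 0 updating (s, best); a right fold over the pairs.
def getRejections_alt (a : List Int) (x : List Int) : Int :=
  ((a.zip x).foldr
    (fun q (st : Int × Int) =>
      let s := st.1 + (q.1 - q.2)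
      (s, if s > st.2 then s else st.2))
    (0, 0)).2

-- ===== PRECONDITION & SPEC =====
-- Pre_ excludes exactly the inputs where Python A raises IndexError: empty a
-- (pending_vec[-1]) and x shorter than a (x[i] out of range).
def Pre_getRejections (a : List Int) (x : List Int) : Prop :=
  a ≠ [] ∧ a.length ≤ x.length
instance (a : List Int) (x : List Int) : Decidable (Pre_getRejections a x) := by
  unfold Pre_getRejections; infer_instance

def pvWitness_getRejections : List Int × List Int := ([3, 0, 2], [1, 1, 1])

def Spec_getRejections (a : List Int) (x : List Int) (out : Int) : Prop := out = getRejections_alt a x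
instance (a : List Int) (x : List Int) (out : Int) : Decidable (Spec_getRejections a x out) := by unfold Spec_getRejections; infer_instance

-- ===== CLAIM (what is proved, stated in full; the proofs are below) =====
def Claim_equal_getRejections : Prop := ∀ (a : List Int) (x : List Int), Dom_getRejections a x → Pre_getRejections a x → Spec_getRejections a x (getRejections a x)

-- ===== LEMMAS AND PROOFS =====

-- the clamp step of A, and the suffix-sum of the differences
def pvClamp (c : Int) (q : Int × Int) : Int := max (c + q.1 - q.2) 0
def pvSumD (l : List (Int × Int)) : Int := (l.map (fun q => q.1 - q.2)).sum

def pvB (l : List (Int × Int)) : Int × Int :=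
  l.foldr (fun q (st : Int × Int) =>
      let s := st.1 + (q.1 - q.2)
      (s, if s > st.2 then s else st.2)) (0, 0)

lemma pvB_fst : ∀ l : List (Int × Int), (pvB l).1 = pvSumD l := by
  intro l
  induction l with
  | nil => rfl
  | cons q t ih => simp [pvB, pvSumD] at ih ⊢; omega

lemma pvB_snd_ge : ∀ l : List (Int × Int), pvSumD l ≤ (pvB l).2 ∧ 0 ≤ (pvB l).2 := by
  intro l
  induction l with
  | nil => simp [pvB, pvSumD]
  | cons q t ih =>
      have hf := pvB_fst t
      simp only [pvB, List.foldr_cons, pvSumD, List.map_cons, List.sum_cons] at *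
      split_ifs <;> omega

-- foldl of the clamp from a nonnegative start equals max(start + total, backward best)
lemma pvClamp_eq_B : ∀ (l : List (Int × Int)) (c : Int), 0 ≤ c →
    l.foldl pvClamp c = max (c + pvSumD l) (pvB l).2 := by
  intro l
  induction l with
  | nil =>
      intro c hc
      simp [pvB, pvSumD]
      omega
  | cons q t ih =>
      intro c hc
      have h1 : List.foldl pvClamp c (q :: t) = List.foldl pvClamp (max (c + q.1 - q.2) 0) t := by
        simp [pvClamp]
      rw [h1, ih _ (le_max_right _ _)]
      have hf := pvB_fst t
      have hg := pvB_snd_ge t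
      simp only [pvB, List.foldr_cons, pvSumD, List.map_cons, List.sum_cons] at *
      split_ifs <;> omega

-- the last element of A's pending_vec is the clamp fold
lemma goA_last : ∀ (l : List (Int × Int)) (pv : List Int),
    (getRejectionsGo l pv).getLastD 0 = l.foldl pvClamp (pv.getLastD 0) := by
  intro l
  induction l with
  | nil => intro pv; rfl
  | cons q t ih =>
      intro pv
      by_cases h : pv.isEmpty
      · have hpv : pv = [] := by simpa [List.isEmpty_iff] using h
        subst hpv
        rw [show getRejectionsGo (q :: t) [] =
              getRejectionsGo t ([] ++ [max (q.1 - q.2) 0]) from rfl, ih]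
        have : (([] : List Int) ++ [max (q.1 - q.2) 0]).getLastD 0 = max (q.1 - q.2) 0 := by simp
        rw [this]
        show _ = List.foldl pvClamp (pvClamp 0 q) t
        congr 1
        simp [pvClamp]
      · rw [show getRejectionsGo (q :: t) pv =
              getRejectionsGo t (pv ++ [max (pv.getLastD 0 + q.1 - q.2) 0]) from by
                simp [getRejectionsGo, h], ih]
        have : (pv ++ [max (pv.getLastD 0 + q.1 - q.2) 0]).getLastD 0 =
            max (pv.getLastD 0 + q.1 - q.2) 0 := by simp
        rw [this]
        rfl

-- ===== VERDICT (by name: the statement is the Claim_ definition above) =====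
theorem getRejections_spec : Claim_equal_getRejections := by
  intro a x _ _
  unfold Spec_getRejections getRejections getRejections_alt
  rw [goA_last]
  have h := pvClamp_eq_B (a.zip x) 0 le_rfl
  have hg := pvB_snd_ge (a.zip x)
  simp only [List.getLastD_nil] at h ⊢
  rw [h]
  show max (0 + pvSumD (a.zip x)) (pvB (a.zip x)).2 = (pvB (a.zip x)).2
  omega
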